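-- pv_equiv track=rewrite | github.com/CUGer3888/Blocks | 3.py | find_valid_blocks
-- ===== SOURCE A (Python) =====
-- from collections import deque
--
-- NUM = 5  # 数值种类数
--
-- def find_valid_blocks(grid):
--     """查找所有有效可点击区域"""
--     n = len(grid)
--     visited = [[False] * n for _ in range(n)]
--     valid_points = []
--
--     def bfs(start_x, start_y):
--         """BFS检测连通区域"""
--         q = deque([(start_x, start_y)])
--         visited[start_x][start_y] = True
--         size = 1
--         target = grid[start_x][start_y]
--
--         while q:
--             x, y = q.popleft()
--             for dx, dy in [(-1, 0), (1, 0), (0, -1), (0, 1)]: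
--                 nx, ny = x + dx, y + dy
--                 if 0 <= nx < n and 0 <= ny < n and not visited[nx][ny] and grid[nx][ny] == target:
--                     visited[nx][ny] = True
--                     q.append((nx, ny))
--                     size += 1
--         return size
--
--     # 遍历所有可能的数值
--     for val in range(1, NUM + 1):
--         for i in range(n):
--             for j in range(n):
--                 if grid[i][j] == val and not visited[i][j]:
--                     if bfs(i, j) >= 2:
--                         valid_points.append((i, j))
--
--     return valid_points
-- ===== SOURCE B (Python) =====
-- NUM = 5  # 数值种类数
--
-- def find_valid_blocks(grid):
--     """Single row-major pass with an iterative DFS (explicit stack) and a set of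
--     visited coordinates; records are grouped by value at the end."""
--     n = len(grid)
--     visited = set()
--     records = []
--     for i in range(n):
--         for j in range(n):
--             v = grid[i][j]
--             if 1 <= v <= NUM and (i, j) not in visited:
--                 visited.add((i, j))
--                 stack = [(i, j)]
--                 size = 1
--                 while stack:
--                     x, y = stack.pop()
--                     for nx, ny in ((x - 1, y), (x + 1, y), (x, y - 1), (x, y + 1)):
--                         if 0 <= nx < n and 0 <= ny < n and (nx, ny) not in visited and grid[nx][ny] == v:
--                             visited.add((nx, ny))
--                             stack.append((nx, ny))
--                             size += 1
--                 if size >= 2: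
--                     records.append((v, (i, j)))
--     return [p for w in range(1, NUM + 1) for (val, p) in records if val == w]
-- ===== Notes on version B (the rewrite author's own statement) =====
-- stated objective: simpler
-- what changed: A scans the whole grid once per value 1..NUM (5 passes) and explores each component by BFS over a deque with a boolean visited matrix; B does a single row-major pass that explores each component by an iterative DFS over an explicit stack with a set of visited coordinate pairs, tags each found component with its value, and groups the collected points by value at the end. Pre_ excludes grids with a row shorter than len(grid), on which A raises IndexError (B raises there too).
import Mathlib
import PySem

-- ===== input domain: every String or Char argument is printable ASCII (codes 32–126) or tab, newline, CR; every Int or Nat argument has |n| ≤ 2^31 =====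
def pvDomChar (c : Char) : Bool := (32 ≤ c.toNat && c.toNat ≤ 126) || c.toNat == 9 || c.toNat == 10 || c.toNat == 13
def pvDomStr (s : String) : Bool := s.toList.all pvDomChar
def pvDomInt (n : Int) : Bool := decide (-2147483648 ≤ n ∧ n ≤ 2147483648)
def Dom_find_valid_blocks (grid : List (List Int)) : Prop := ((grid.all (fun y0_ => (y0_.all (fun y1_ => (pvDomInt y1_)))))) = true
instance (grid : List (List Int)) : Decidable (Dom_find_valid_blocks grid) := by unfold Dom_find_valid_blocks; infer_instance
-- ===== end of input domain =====

-- B replaces A's NUM(=5) per-value grid passes + BFS over a deque and a boolean visited matrix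
-- by a single row-major pass + iterative DFS over an explicit stack and a set of visited
-- coordinates, grouping the collected points by value at the end (simpler decomposition).

-- ===== PORT A =====
def pvN (grid : List (List Int)) : Int := (grid.length : Int)

def pvGAt (grid : List (List Int)) (x y : Int) : Int := (grid.getD x.toNat []).getD y.toNat 0

def pvVAt (vis : List (List Bool)) (x y : Int) : Bool := (vis.getD x.toNat []).getD y.toNat false

def pvVSet (vis : List (List Bool)) (x y : Int) : List (List Bool) :=
  vis.set x.toNat ((vis.getD x.toNat []).set y.toNat true)

def pvShape (m : Nat) (vis : List (List Bool)) : Prop :=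
  vis.length = m ∧ ∀ r ∈ vis, r.length = m

-- visited matrices of the right shape (the shape is what makes the BFS loop terminate)
def pvVis (m : Nat) : Type := { vis : List (List Bool) // pvShape m vis }

def pvUnvis (vis : List (List Bool)) : Nat := (vis.map (fun r => r.count false)).sum

def pvDirs : List (Int × Int) := [(-1, 0), (1, 0), (0, -1), (0, 1)]

-- one neighbour check of the BFS inner `for dx, dy in …` loop
def pvNb (grid : List (List Int)) (t x y : Int)
    (st : List (List Bool) × List (Int × Int) × Nat) (d : Int × Int) :
    List (List Bool) × List (Int × Int) × Nat :=
  if 0 ≤ x + d.1 ∧ x + d.1 < pvN grid ∧ 0 ≤ y + d.2 ∧ y + d.2 < pvN grid ∧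
      pvVAt st.1 (x + d.1) (y + d.2) = false ∧ pvGAt grid (x + d.1) (y + d.2) = t then
    (pvVSet st.1 (x + d.1) (y + d.2), st.2.1 ++ [(x + d.1, y + d.2)], st.2.2 + 1)
  else st

-- the whole neighbour loop for one popped cell
def pvNbFold (grid : List (List Int)) (t x y : Int)
    (st : List (List Bool) × List (Int × Int) × Nat) :
    List (List Bool) × List (Int × Int) × Nat :=
  pvDirs.foldl (fun st d => pvNb grid t x y st d) st

theorem pvVSet_shape {m : Nat} {vis : List (List Bool)} (h : pvShape m vis) (x y : Int) :
    pvShape m (pvVSet vis x y) := by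
  obtain ⟨h1, h2⟩ := h
  rcases Nat.lt_or_ge x.toNat vis.length with hx | hx
  · refine ⟨by simp [pvVSet, h1], ?_⟩
    intro r hr
    rcases List.mem_or_eq_of_mem_set hr with hr' | rfl
    · exact h2 _ hr'
    · simp [List.getD_eq_getElem?_getD, List.getElem?_eq_getElem hx]
      exact h2 _ (List.getElem_mem hx)
  · rw [pvVSet, List.set_eq_of_length_le hx]
    exact ⟨h1, h2⟩

theorem pvSumSplit (l : List Nat) (i : Nat) (h : i < l.length) :
    l.sum = (l.take i).sum + l[i] + (l.drop (i+1)).sum := by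
  conv_lhs => rw [← List.take_append_drop i l]
  rw [List.sum_append, List.drop_eq_getElem_cons h, List.sum_cons]
  omega

theorem pvUnvis_vSet {m : Nat} {vis : List (List Bool)} (h : pvShape m vis) {x y : Int}
    (hx : x.toNat < m) (hy : y.toNat < m) (hf : pvVAt vis x y = false) :
    pvUnvis (pvVSet vis x y) + 1 = pvUnvis vis := by
  obtain ⟨h1, h2⟩ := h
  have hx' : x.toNat < vis.length := by omega
  have hrow : vis.getD x.toNat [] = vis[x.toNat] := by
    simp [List.getD_eq_getElem?_getD, List.getElem?_eq_getElem hx']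
  have hjr : y.toNat < (vis[x.toNat]).length := by
    rw [h2 _ (List.getElem_mem hx')]; exact hy
  have hfj : (vis[x.toNat])[y.toNat] = false := by
    rw [pvVAt, hrow, List.getD_eq_getElem?_getD, List.getElem?_eq_getElem hjr] at hf
    simpa using hf
  have hmem : false ∈ vis[x.toNat] := hfj ▸ List.getElem_mem hjr
  have hcnt : ((vis[x.toNat]).set y.toNat true).count false + 1 = (vis[x.toNat]).count false := by
    rw [List.count_set hjr]
    have : 0 < (vis[x.toNat]).count false := List.count_pos_iff.2 hmem
    simp [hfj]
    omega
  have him : x.toNat < (vis.map (fun r => r.count false)).length := by simpa using hx'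
  unfold pvUnvis pvVSet
  rw [hrow, List.map_set]
  rw [pvSumSplit _ x.toNat (by simpa using hx'), pvSumSplit (vis.map (fun r => r.count false)) x.toNat him]
  simp only [List.take_set, List.drop_set, List.getElem_set_self, List.getElem_map,
    Nat.lt_succ_self, if_pos]
  rw [List.set_eq_of_length_le (by simp)]
  omega

theorem pvNb_mono {grid : List (List Int)} {t x y : Int} {d : Int × Int}
    {st : List (List Bool) × List (Int × Int) × Nat} (h : pvShape grid.length st.1) :
    pvShape grid.length (pvNb grid t x y st d).1 ∧
    2 * pvUnvis (pvNb grid t x y st d).1 + (pvNb grid t x y st d).2.1.length ≤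
      2 * pvUnvis st.1 + st.2.1.length := by
  unfold pvNb
  split
  · rename_i hg
    simp only [pvN] at hg
    have hxn : (x + d.1).toNat < grid.length := by omega
    have hyn : (y + d.2).toNat < grid.length := by omega
    refine ⟨pvVSet_shape h _ _, ?_⟩
    have := pvUnvis_vSet h (x := x + d.1) (y := y + d.2) hxn hyn hg.2.2.2.2.1
    simp only [List.length_append, List.length_cons, List.length_nil]
    omega
  · exact ⟨h, le_refl _⟩

theorem pvNbFold_mono {grid : List (List Int)} {t x y : Int}
    {st : List (List Bool) × List (Int × Int) × Nat} (h : pvShape grid.length st.1) :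
    pvShape grid.length (pvNbFold grid t x y st).1 ∧
    2 * pvUnvis (pvNbFold grid t x y st).1 + (pvNbFold grid t x y st).2.1.length ≤
      2 * pvUnvis st.1 + st.2.1.length := by
  have gen : ∀ (ds : List (Int × Int)) (st : List (List Bool) × List (Int × Int) × Nat),
      pvShape grid.length st.1 →
      pvShape grid.length (ds.foldl (fun st d => pvNb grid t x y st d) st).1 ∧
      2 * pvUnvis (ds.foldl (fun st d => pvNb grid t x y st d) st).1 +
          (ds.foldl (fun st d => pvNb grid t x y st d) st).2.1.length ≤
        2 * pvUnvis st.1 + st.2.1.length := by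
    intro ds
    induction ds with
    | nil => intro st h; exact ⟨h, le_refl _⟩
    | cons d ds ih =>
      intro st h
      have h1 := pvNb_mono (t := t) (x := x) (y := y) (d := d) h
      have h2 := ih _ h1.1
      exact ⟨h2.1, le_trans h2.2 h1.2⟩
  exact gen pvDirs st h

-- the `while q:` loop of bfs; the shape of `visited` is carried to justify termination
def pvBfsLoop (grid : List (List Int)) (t : Int) (vis : pvVis grid.length)
    (q : List (Int × Int)) (size : Nat) : pvVis grid.length × Nat :=
  match q with
  | [] => (vis, size)
  | (x, y) :: q' =>
    let st := pvNbFold grid t x y (vis.val, q', size)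
    pvBfsLoop grid t ⟨st.1, (pvNbFold_mono vis.property).1⟩ st.2.1 st.2.2
termination_by 2 * pvUnvis vis.val + q.length
decreasing_by
  have h : 2 * pvUnvis (pvNbFold grid t x y (vis.val, q', size)).1 +
      (pvNbFold grid t x y (vis.val, q', size)).2.1.length ≤ 2 * pvUnvis vis.val + q'.length :=
    (pvNbFold_mono (grid := grid) (t := t) (x := x) (y := y)
      (st := (vis.val, q', size)) vis.property).2
  simp only [List.length_cons]
  omega

-- `bfs(start_x, start_y)`: target = grid[start], start marked, queue seeded
def pvBfs (grid : List (List Int)) (x y : Int) (vis : pvVis grid.length) :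
    pvVis grid.length × Nat :=
  pvBfsLoop grid (pvGAt grid x y) ⟨pvVSet vis.val x y, pvVSet_shape vis.property x y⟩ [(x, y)] 1

-- A's inner-loop body: `if grid[i][j] == val and not visited[i][j]: if bfs(i,j) >= 2: append (i,j)`
def pvCellA (grid : List (List Int)) (val : Int)
    (st : pvVis grid.length × List (Int × Int)) (c : Int × Int) :
    pvVis grid.length × List (Int × Int) :=
  if pvGAt grid c.1 c.2 = val ∧ pvVAt st.1.val c.1 c.2 = false then
    let r := pvBfs grid c.1 c.2 st.1
    (r.1, if 2 ≤ r.2 then st.2 ++ [c] else st.2)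
  else st

theorem pvShape_replicate (m : Nat) : pvShape m (List.replicate m (List.replicate m false)) := by
  constructor
  · simp
  · intro r hr
    simp_all [List.eq_of_mem_replicate hr]

-- NUM = 5
def find_valid_blocks (grid : List (List Int)) : List (Int × Int) :=
  let n := pvN grid
  let vis0 : pvVis grid.length :=
    ⟨List.replicate grid.length (List.replicate grid.length false), pvShape_replicate _⟩
  ((PySem.List.pyRange 1 (5 + 1) 1).foldl (fun st val =>
      (PySem.List.pyRange 0 n 1).foldl (fun st i =>
        (PySem.List.pyRange 0 n 1).foldl (fun st j => pvCellA grid val st (i, j)) st) st)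
    (vis0, [])).2

-- ===== PORT B =====
-- B's grid access `grid[c[0]][c[1]]` on a coordinate pair
def pvBAt (grid : List (List Int)) (c : Int × Int) : Int :=
  (grid.getD c.1.toNat []).getD c.2.toNat 0

-- the four neighbour coordinates B enumerates directly: (x-1,y),(x+1,y),(x,y-1),(x,y+1)
def pvBNbrs (x y : Int) : List (Int × Int) := [(x - 1, y), (x + 1, y), (x, y - 1), (x, y + 1)]

-- all in-range cells (used only to measure termination of the DFS loop)
def pvBCells (grid : List (List Int)) : List (Int × Int) :=
  (PySem.List.pyRange 0 (grid.length : Int) 1).flatMap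
    (fun i => (PySem.List.pyRange 0 (grid.length : Int) 1).map (fun j => (i, j)))

def pvBFree (grid : List (List Int)) (s : PySem.Set (Int × Int)) : Nat :=
  (pvBCells grid).countP (fun c => !(PySem.Set.contains s c))

-- one neighbour check of the DFS inner loop:
-- `if 0<=nx<n and 0<=ny<n and (nx,ny) not in visited and grid[nx][ny]==v: …`
def pvBVisit (grid : List (List Int)) (t : Int)
    (st : PySem.Set (Int × Int) × List (Int × Int) × Nat) (c : Int × Int) :
    PySem.Set (Int × Int) × List (Int × Int) × Nat :=
  if 0 ≤ c.1 ∧ c.1 < (grid.length : Int) ∧ 0 ≤ c.2 ∧ c.2 < (grid.length : Int) ∧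
      PySem.Set.contains st.1 c = false ∧ pvBAt grid c = t then
    (PySem.Set.add st.1 c, st.2.1 ++ [c], st.2.2 + 1)
  else st

theorem pvCountP_lt {α : Type} (l : List α) (p q : α → Bool) (c : α) (hc : c ∈ l)
    (hq : q c = true) (hp : p c = false) (himp : ∀ d, p d = true → q d = true) :
    l.countP p < l.countP q := by
  induction l with
  | nil => cases hc
  | cons a l ih =>
    rw [List.countP_cons, List.countP_cons]
    have hmono : l.countP p ≤ l.countP q := List.countP_mono_left (fun d _ => himp d)
    rcases List.mem_cons.mp hc with rfl | hc'
    · rw [hq, hp]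
      simp only [Bool.false_eq_true, if_false, if_true]
      omega
    · have hlt := ih hc'
      have hle : (if p a = true then 1 else 0) ≤ (if q a = true then 1 else 0) := by
        by_cases hpa : p a = true
        · simp [hpa, himp a hpa]
        · simp [hpa]
      omega

theorem pvBCells_mem {grid : List (List Int)} {c : Int × Int}
    (h1 : 0 ≤ c.1) (h2 : c.1 < (grid.length : Int)) (h3 : 0 ≤ c.2)
    (h4 : c.2 < (grid.length : Int)) : c ∈ pvBCells grid := by
  unfold pvBCells
  refine List.mem_flatMap.mpr ⟨c.1, ?_, List.mem_map.mpr ⟨c.2, ?_, ?_⟩⟩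
  · exact PySem.List.mem_pyRange_one.mpr ⟨h1, h2⟩
  · exact PySem.List.mem_pyRange_one.mpr ⟨h3, h4⟩
  · rfl

theorem pvBVisit_mono {grid : List (List Int)} {t : Int}
    {st : PySem.Set (Int × Int) × List (Int × Int) × Nat} {c : Int × Int} :
    2 * pvBFree grid (pvBVisit grid t st c).1 + (pvBVisit grid t st c).2.1.length ≤
      2 * pvBFree grid st.1 + st.2.1.length := by
  unfold pvBVisit
  split
  · rename_i h
    have hcmem : c ∈ pvBCells grid := pvBCells_mem h.1 h.2.1 h.2.2.1 h.2.2.2.1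
    have hlt : pvBFree grid (PySem.Set.add st.1 c) < pvBFree grid st.1 := by
      apply pvCountP_lt _ _ _ c hcmem
      · rw [h.2.2.2.2.1]; rfl
      · have hcm : c ∈ PySem.Set.add st.1 c := (PySem.Set.mem_add _ _ _).mpr (Or.inr rfl)
        rw [(PySem.Set.contains_iff _ _).mpr hcm]; rfl
      · intro d hd
        have hd1 : d ∉ PySem.Set.add st.1 c := by
          intro hm
          rw [(PySem.Set.contains_iff _ _).mpr hm] at hd
          simp at hd
        have hd2 : st.1.contains d = false := by
          cases hcd : st.1.contains d
          · rfl
          · exact absurd ((PySem.Set.mem_add _ _ _).mpr (Or.inl ((PySem.Set.contains_iff _ _).mp hcd))) hd1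
        rw [hd2]; rfl
    simp only [List.length_append, List.length_cons, List.length_nil]
    omega
  · exact le_refl _

theorem pvBFold_mono {grid : List (List Int)} {t : Int} (L : List (Int × Int)) :
    ∀ (st : PySem.Set (Int × Int) × List (Int × Int) × Nat),
    2 * pvBFree grid ((L.foldl (pvBVisit grid t) st)).1 +
        (L.foldl (pvBVisit grid t) st).2.1.length ≤
      2 * pvBFree grid st.1 + st.2.1.length := by
  induction L with
  | nil => intro st; exact le_refl _
  | cons c L ih =>
    intro st
    exact le_trans (ih _) pvBVisit_mono

-- B's `while stack:` loop; `stack.pop()` takes the LAST element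
def pvBLoop (grid : List (List Int)) (t : Int) (vis : PySem.Set (Int × Int))
    (stack : List (Int × Int)) (size : Nat) : PySem.Set (Int × Int) × Nat :=
  if h : stack = [] then (vis, size)
  else
    let c := stack.getLast h
    let st := (pvBNbrs c.1 c.2).foldl (pvBVisit grid t) (vis, stack.dropLast, size)
    pvBLoop grid t st.1 st.2.1 st.2.2
termination_by 2 * pvBFree grid vis + stack.length
decreasing_by
  have hm := pvBFold_mono (grid := grid) (t := t) (pvBNbrs (stack.getLast h).1 (stack.getLast h).2) (vis, stack.dropLast, size)
  have hl : stack.dropLast.length + 1 = stack.length := by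
    rw [List.length_dropLast]
    have : stack.length ≠ 0 := fun h0 => h (List.eq_nil_of_length_eq_zero h0)
    omega
  simp only at hm
  omega

-- B's loop body: `v = grid[i][j]; if 1 <= v <= NUM and (i,j) not in visited: DFS; if size>=2: append (v,(i,j))`
def pvBCell (grid : List (List Int))
    (st : PySem.Set (Int × Int) × List (Int × (Int × Int))) (c : Int × Int) :
    PySem.Set (Int × Int) × List (Int × (Int × Int)) :=
  let v := pvBAt grid c
  if 1 ≤ v ∧ v ≤ 5 ∧ PySem.Set.contains st.1 c = false then
    let r := pvBLoop grid v (PySem.Set.add st.1 c) [c] 1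
    (r.1, if 2 ≤ r.2 then st.2 ++ [(v, c)] else st.2)
  else st

-- NUM = 5; final comprehension groups the records by value
def find_valid_blocks_alt (grid : List (List Int)) : List (Int × Int) :=
  let recs := ((PySem.List.pyRange 0 (grid.length : Int) 1).foldl (fun st i =>
      (PySem.List.pyRange 0 (grid.length : Int) 1).foldl (fun st j => pvBCell grid st (i, j)) st)
    ((PySem.Set.empty : PySem.Set (Int × Int)), ([] : List (Int × (Int × Int))))).2
  (PySem.List.pyRange 1 (5 + 1) 1).foldl
    (fun acc w => acc ++ recs.filterMap (fun r => if r.1 = w then some r.2 else none)) []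

-- ===== PRECONDITION & SPEC =====
-- Pre_ excludes exactly the grids with a row shorter than len(grid): there Python A raises
-- IndexError (grid[i][j] for j < n); A returns normally on every other input.
def Pre_find_valid_blocks (grid : List (List Int)) : Prop :=
  ∀ r ∈ grid, grid.length ≤ r.length
instance (grid : List (List Int)) : Decidable (Pre_find_valid_blocks grid) := by
  unfold Pre_find_valid_blocks; infer_instance

def pvWitness_find_valid_blocks : List (List Int) := [[1, 1], [2, 3]]

def Spec_find_valid_blocks (grid : List (List Int)) (out : List (Int × Int)) : Prop :=
  out = find_valid_blocks_alt grid
instance (grid : List (List Int)) (out : List (Int × Int)) : Decidable (Spec_find_valid_blocks grid out) := by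
  unfold Spec_find_valid_blocks; infer_instance

-- ===== CLAIM (what is proved, stated in full; the proofs are below) =====
def Claim_equal_find_valid_blocks : Prop := ∀ (grid : List (List Int)), Dom_find_valid_blocks grid → Pre_find_valid_blocks grid → Spec_find_valid_blocks grid (find_valid_blocks grid)

-- ===== LEMMAS AND PROOFS =====

-- proof-side notions: in-range cells, reachability through same-valued cells, Bool glue
def pvInR (grid : List (List Int)) (c : Int × Int) : Prop :=
  0 ≤ c.1 ∧ c.1 < pvN grid ∧ 0 ≤ c.2 ∧ c.2 < pvN grid

-- cells of value t reachable from s, stepping only through in-range t-cells that the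
-- membership function m does not already mark (m = the visited state at exploration entry)
inductive pvReach (grid : List (List Int)) (t : Int) (m : Int × Int → Bool) :
    (Int × Int) → (Int × Int) → Prop
  | refl (s : Int × Int) : pvReach grid t m s s
  | step (s c d : Int × Int) : pvReach grid t m s c → d ∈ pvBNbrs c.1 c.2 →
      pvInR grid d → pvGAt grid d.1 d.2 = t → m d = false → pvReach grid t m s d

theorem pvReach_inR {grid : List (List Int)} {t : Int} {m : Int × Int → Bool}
    {s c : Int × Int} (h : pvReach grid t m s c) (hs : pvInR grid s) : pvInR grid c := by
  induction h with
  | refl => exact hs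
  | step c d _ _ hin _ _ _ => exact hin

theorem pvReach_val {grid : List (List Int)} {t : Int} {m : Int × Int → Bool}
    {s c : Int × Int} (h : pvReach grid t m s c) :
    c = s ∨ (pvGAt grid c.1 c.2 = t ∧ m c = false) := by
  cases h with
  | refl => exact Or.inl rfl
  | step c d _ _ _ hg hm => exact Or.inr ⟨hg, hm⟩

theorem pvReach_congr {grid : List (List Int)} {t : Int} {m1 m2 : Int × Int → Bool}
    (hm : ∀ d, pvInR grid d → pvGAt grid d.1 d.2 = t → m1 d = m2 d)
    {s c : Int × Int} (h : pvReach grid t m1 s c) : pvReach grid t m2 s c := by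
  induction h with
  | refl => exact pvReach.refl s
  | step c d _ hnb hin hg hm1 ih =>
    exact pvReach.step _ c d ih hnb hin hg (by rw [← hm d hin hg]; exact hm1)

theorem pvContains_false {α : Type} [BEq α] [LawfulBEq α] {s : PySem.Set α} {x : α}
    (h : x ∉ s) : PySem.Set.contains s x = false := by
  cases hc : PySem.Set.contains s x
  · rfl
  · exact absurd ((PySem.Set.contains_iff _ _).mp hc) h

theorem pvContains_add {α : Type} [BEq α] [LawfulBEq α] [DecidableEq α]
    (s : PySem.Set α) (c e : α) :
    PySem.Set.contains (PySem.Set.add s c) e =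
      (PySem.Set.contains s e || decide (e = c)) := by
  by_cases hm : e ∈ s
  · rw [(PySem.Set.contains_iff _ _).mpr ((PySem.Set.mem_add _ _ _).mpr (Or.inl hm)),
      (PySem.Set.contains_iff _ _).mpr hm]
    rfl
  · by_cases hec : e = c
    · rw [(PySem.Set.contains_iff _ _).mpr ((PySem.Set.mem_add _ _ _).mpr (Or.inr hec)),
        pvContains_false hm, hec]
      simp
    · rw [pvContains_false hm,
        pvContains_false (fun hh => ((PySem.Set.mem_add _ _ _).mp hh).elim hm hec)]
      simp [hec]

-- matrix-level helpers
theorem pvGetD_set {α : Type} (l : List α) (i j : Nat) (a : α) (dflt : α) :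
    (l.set i a).getD j dflt = if j = i ∧ i < l.length then a else l.getD j dflt := by
  simp only [List.getD_eq_getElem?_getD, List.getElem?_set]
  split_ifs with h1 h2 h3 <;> simp_all

theorem pvVAt_vSet_self {m : Nat} {vis : List (List Bool)} (h : pvShape m vis) {x y : Int}
    (hx : x.toNat < m) (hy : y.toNat < m) :
    pvVAt (pvVSet vis x y) x y = true := by
  obtain ⟨h1, h2⟩ := h
  have hx' : x.toNat < vis.length := by omega
  have hrow : vis.getD x.toNat [] = vis[x.toNat] := by
    simp [List.getD_eq_getElem?_getD, List.getElem?_eq_getElem hx']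
  have hjr : y.toNat < (vis[x.toNat]).length := by
    rw [h2 _ (List.getElem_mem hx')]; exact hy
  unfold pvVAt pvVSet
  rw [pvGetD_set, if_pos ⟨rfl, hx'⟩, hrow, pvGetD_set, if_pos ⟨rfl, hjr⟩]

theorem pvVAt_vSet_ne {vis : List (List Bool)} {x y x' y' : Int}
    (hne : x.toNat ≠ x'.toNat ∨ y.toNat ≠ y'.toNat) :
    pvVAt (pvVSet vis x y) x' y' = pvVAt vis x' y' := by
  unfold pvVAt pvVSet
  rw [pvGetD_set]
  rcases hne with hne | hne
  · rw [if_neg (by intro h; exact hne h.1.symm)]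
  · split_ifs with h
    · rw [pvGetD_set, if_neg (by intro h'; exact hne h'.1.symm), h.1]
    · rfl

theorem pvVAt_vSet_mono {vis : List (List Bool)} {x y a b : Int}
    (h : pvVAt vis a b = true) : pvVAt (pvVSet vis x y) a b = true := by
  unfold pvVAt pvVSet at *
  rw [pvGetD_set]
  split_ifs with hc
  · rw [hc.1] at h
    rw [pvGetD_set]
    split_ifs with hc2
    · rfl
    · exact h
  · exact h

-- two distinct in-range cells differ in a toNat coordinate
theorem pvInR_toNat_ne {grid : List (List Int)} {c c' : Int × Int}
    (hc : pvInR grid c) (hc' : pvInR grid c') (hne : c ≠ c') :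
    c.1.toNat ≠ c'.1.toNat ∨ c.2.toNat ≠ c'.2.toNat := by
  obtain ⟨h1, h2, h3, h4⟩ := hc
  obtain ⟨g1, g2, g3, g4⟩ := hc'
  by_contra hcon
  push Not at hcon
  exact hne (Prod.ext (by omega) (by omega))

-- the offset list of A generates exactly the neighbour list of B
theorem pvDirs_map (x y : Int) :
    pvDirs.map (fun d => (x + d.1, y + d.2)) = pvBNbrs x y := by
  simp [pvDirs, pvBNbrs, Prod.ext_iff]
  constructor <;> omega

theorem pvBNbrs_ne_center {x y : Int} {d : Int × Int} (h : d ∈ pvBNbrs x y) :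
    d ≠ (x, y) := by
  simp [pvBNbrs] at h
  rcases h with rfl | rfl | rfl | rfl <;>
    (intro he; rw [Prod.ext_iff] at he; simp at he)

-- A-side fold (proof handle for pvNbFold over an arbitrary offset list)
def pvAFold (grid : List (List Int)) (t x y : Int) (L : List (Int × Int))
    (st : List (List Bool) × List (Int × Int) × Nat) :
    List (List Bool) × List (Int × Int) × Nat :=
  L.foldl (fun st d => pvNb grid t x y st d) st

theorem pvAFoldSpec (grid : List (List Int)) (t x y : Int) (L : List (Int × Int)) :
    ∀ (V : List (List Bool)) (q : List (Int × Int)) (size : Nat),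
    pvShape grid.length V →
    pvShape grid.length (pvAFold grid t x y L (V, q, size)).1 ∧
    (∀ a b : Int, pvVAt V a b = true → pvVAt (pvAFold grid t x y L (V, q, size)).1 a b = true) ∧
    (∀ e : Int × Int, pvInR grid e → pvVAt (pvAFold grid t x y L (V, q, size)).1 e.1 e.2 = true →
      pvVAt V e.1 e.2 = true ∨ e ∈ (pvAFold grid t x y L (V, q, size)).2.1) ∧
    (∀ d ∈ L, pvInR grid (x + d.1, y + d.2) → pvGAt grid (x + d.1) (y + d.2) = t →
      pvVAt (pvAFold grid t x y L (V, q, size)).1 (x + d.1) (y + d.2) = true) ∧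
    (∀ e ∈ (pvAFold grid t x y L (V, q, size)).2.1, e ∈ q ∨
      (pvInR grid e ∧ pvGAt grid e.1 e.2 = t ∧ pvVAt V e.1 e.2 = false ∧
        pvVAt (pvAFold grid t x y L (V, q, size)).1 e.1 e.2 = true ∧
        ∃ d ∈ L, e = (x + d.1, y + d.2))) ∧
    (∀ e ∈ q, e ∈ (pvAFold grid t x y L (V, q, size)).2.1) ∧
    (size ≤ (pvAFold grid t x y L (V, q, size)).2.2) ∧
    (∀ e : Int × Int, pvInR grid e → pvVAt V e.1 e.2 = false →
      pvVAt (pvAFold grid t x y L (V, q, size)).1 e.1 e.2 = true →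
      size + 1 ≤ (pvAFold grid t x y L (V, q, size)).2.2) := by
  induction L with
  | nil =>
    intro V q size hV
    simp only [pvAFold, List.foldl_nil]
    refine ⟨hV, fun a b h => h, fun e _ h => Or.inl h, ?_, fun e he => Or.inl he,
      fun e he => he, le_refl _, fun e _ hf ht => absurd ht (by rw [hf]; exact Bool.false_ne_true)⟩
    intro d hd
    cases hd
  | cons d L ih =>
    intro V q size hV
    simp only [pvAFold, List.foldl_cons] at *
    by_cases hg : 0 ≤ x + d.1 ∧ x + d.1 < pvN grid ∧ 0 ≤ y + d.2 ∧ y + d.2 < pvN grid ∧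
        pvVAt V (x + d.1) (y + d.2) = false ∧ pvGAt grid (x + d.1) (y + d.2) = t
    · rw [show pvNb grid t x y (V, q, size) d =
          (pvVSet V (x + d.1) (y + d.2), q ++ [(x + d.1, y + d.2)], size + 1) from by
        simp only [pvNb, if_pos hg]]
      obtain ⟨S1, S2, S3, S4, S5, S6, S7, S8⟩ :=
        ih (pvVSet V (x + d.1) (y + d.2)) (q ++ [(x + d.1, y + d.2)]) (size + 1)
          (pvVSet_shape hV _ _)
      have hxb : (x + d.1).toNat < grid.length := by
        have := hg.2.1; simp only [pvN] at this; omega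
      have hyb : (y + d.2).toNat < grid.length := by
        have := hg.2.2.2.1; simp only [pvN] at this; omega
      have hcellR : pvInR grid (x + d.1, y + d.2) := ⟨hg.1, hg.2.1, hg.2.2.1, hg.2.2.2.1⟩
      have hmark : pvVAt (pvVSet V (x + d.1) (y + d.2)) (x + d.1) (y + d.2) = true :=
        pvVAt_vSet_self hV hxb hyb
      refine ⟨S1, ?_, ?_, ?_, ?_, ?_, ?_, ?_⟩
      · exact fun a b h => S2 a b (pvVAt_vSet_mono h)
      · intro e he hre
        rcases S3 e he hre with h1 | h1
        · by_cases hec : e = (x + d.1, y + d.2)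
          · subst hec
            exact Or.inr (S6 _ (List.mem_append.mpr (Or.inr (List.mem_singleton.mpr rfl))))
          · left
            rw [← pvVAt_vSet_ne (pvInR_toNat_ne hcellR he (Ne.symm hec))]
            exact h1
        · exact Or.inr h1
      · intro d' hd' hinr hgat
        rcases List.mem_cons.mp hd' with rfl | hd'
        · exact S2 _ _ hmark
        · exact S4 d' hd' hinr hgat
      · intro e he
        rcases S5 e he with h1 | h1
        · rcases List.mem_append.mp h1 with h2 | h2
          · exact Or.inl h2
          · right
            have he2 : e = (x + d.1, y + d.2) := List.mem_singleton.mp h2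
            subst he2
            exact ⟨hcellR, hg.2.2.2.2.2, hg.2.2.2.2.1, S2 _ _ hmark,
              ⟨d, List.mem_cons_self, rfl⟩⟩
        · obtain ⟨hi, hgt, hf, hm, dd, hdd, hedd⟩ := h1
          refine Or.inr ⟨hi, hgt, ?_, hm, ⟨dd, List.mem_cons_of_mem _ hdd, hedd⟩⟩
          cases hvVe : pvVAt V e.1 e.2
          · rfl
          · rw [pvVAt_vSet_mono hvVe] at hf
            exact hf
      · exact fun e he => S6 e (List.mem_append.mpr (Or.inl he))
      · exact le_trans (Nat.le_succ _) S7
      · exact fun e _ _ _ => S7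
    · rw [show pvNb grid t x y (V, q, size) d = (V, q, size) from by
        simp only [pvNb, if_neg hg]]
      obtain ⟨S1, S2, S3, S4, S5, S6, S7, S8⟩ := ih V q size hV
      refine ⟨S1, S2, S3, ?_, ?_, S6, S7, S8⟩
      · intro d' hd' hinr hgat
        rcases List.mem_cons.mp hd' with rfl | hd'
        · have hVt : pvVAt V (x + d'.1) (y + d'.2) = true := by
            by_contra hf
            rw [Bool.not_eq_true] at hf
            exact hg ⟨hinr.1, hinr.2.1, hinr.2.2.1, hinr.2.2.2, hf, hgat⟩
          exact S2 _ _ hVt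
        · exact S4 d' hd' hinr hgat
      · intro e he
        rcases S5 e he with h1 | h1
        · exact Or.inl h1
        · obtain ⟨hi, hgt, hf, hm, dd, hdd, hedd⟩ := h1
          exact Or.inr ⟨hi, hgt, hf, hm, ⟨dd, List.mem_cons_of_mem _ hdd, hedd⟩⟩

theorem pvAFold_id (grid : List (List Int)) (t x y : Int) (L : List (Int × Int))
    (V : List (List Bool)) (q : List (Int × Int)) (size : Nat)
    (h : ∀ d ∈ L, ¬(0 ≤ x + d.1 ∧ x + d.1 < pvN grid ∧ 0 ≤ y + d.2 ∧ y + d.2 < pvN grid ∧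
      pvVAt V (x + d.1) (y + d.2) = false ∧ pvGAt grid (x + d.1) (y + d.2) = t)) :
    pvAFold grid t x y L (V, q, size) = (V, q, size) := by
  induction L with
  | nil => rfl
  | cons d L ih =>
    simp only [pvAFold, List.foldl_cons] at *
    rw [show pvNb grid t x y (V, q, size) d = (V, q, size) from by
      simp only [pvNb, if_neg (h d List.mem_cons_self)]]
    exact ih (fun d' hd' => h d' (List.mem_cons_of_mem _ hd'))


theorem pvBfsLoop_sizeMono (grid : List (List Int)) (t : Int) :
    ∀ (vis : pvVis grid.length) (q : List (Int × Int)) (size : Nat),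
    size ≤ (pvBfsLoop grid t vis q size).2 := by
  intro vis q size
  induction vis, q, size using pvBfsLoop.induct grid t with
  | case1 vis size => rw [pvBfsLoop]
  | case2 vis size x y q' st ih =>
    rw [pvBfsLoop]
    exact le_trans (pvAFoldSpec grid t x y pvDirs vis.val q' size vis.property).2.2.2.2.2.2.1 ih

theorem pvBfsLoop_char (grid : List (List Int)) (t : Int) (m0 : Int × Int → Bool)
    (s0 : Int × Int) :
    ∀ (vis : pvVis grid.length) (q : List (Int × Int)) (size : Nat),
    (∀ e : Int × Int, m0 e = true → pvVAt vis.val e.1 e.2 = true) →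
    (∀ e ∈ q, pvInR grid e ∧ pvVAt vis.val e.1 e.2 = true ∧ pvReach grid t m0 s0 e) →
    (∀ e : Int × Int, pvInR grid e → pvVAt vis.val e.1 e.2 = true →
      m0 e = true ∨ pvReach grid t m0 s0 e) →
    (∀ e : Int × Int, pvInR grid e → pvVAt vis.val e.1 e.2 = true → pvReach grid t m0 s0 e →
      e ∈ q ∨ ∀ d ∈ pvBNbrs e.1 e.2, pvInR grid d → pvGAt grid d.1 d.2 = t →
        pvVAt vis.val d.1 d.2 = true) →
    (∀ e : Int × Int, pvVAt vis.val e.1 e.2 = true →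
      pvVAt (pvBfsLoop grid t vis q size).1.val e.1 e.2 = true) ∧
    (∀ e : Int × Int, pvInR grid e → pvVAt (pvBfsLoop grid t vis q size).1.val e.1 e.2 = true →
      m0 e = true ∨ pvReach grid t m0 s0 e) ∧
    (∀ e : Int × Int, pvInR grid e → pvVAt (pvBfsLoop grid t vis q size).1.val e.1 e.2 = true →
      pvReach grid t m0 s0 e →
      ∀ d ∈ pvBNbrs e.1 e.2, pvInR grid d → pvGAt grid d.1 d.2 = t →
        pvVAt (pvBfsLoop grid t vis q size).1.val d.1 d.2 = true) := by
  intro vis q size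
  induction vis, q, size using pvBfsLoop.induct grid t with
  | case1 vis size =>
    intro H0 Hq Hs Hc
    rw [pvBfsLoop]
    refine ⟨fun e h => h, Hs, ?_⟩
    intro e he hm hr d hd hdin hdg
    rcases Hc e he hm hr with h | h
    · cases h
    · exact h d hd hdin hdg
  | case2 vis size x y q' st ih =>
    intro H0 Hq Hs Hc
    rw [pvBfsLoop]
    obtain ⟨S1, S2, S3, S4, S5, S6, S7, S8⟩ :=
      pvAFoldSpec grid t x y pvDirs vis.val q' size vis.property
    have hxyq := Hq (x, y) List.mem_cons_self
    have Hq' : ∀ e ∈ (pvNbFold grid t x y (vis.val, q', size)).2.1,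
        pvInR grid e ∧ pvVAt (pvNbFold grid t x y (vis.val, q', size)).1 e.1 e.2 = true ∧
        pvReach grid t m0 s0 e := by
      intro e he
      rcases S5 e he with h | h
      · obtain ⟨hi, hv, hr⟩ := Hq e (List.mem_cons_of_mem _ h)
        exact ⟨hi, S2 _ _ hv, hr⟩
      · obtain ⟨hi, hgt, hf, hm, dd, hdd, hedd⟩ := h
        have hnb : e ∈ pvBNbrs x y := by
          rw [← pvDirs_map x y]
          exact List.mem_map.mpr ⟨dd, hdd, hedd.symm⟩
        have hm0f : m0 e = false := by
          cases hm0 : m0 e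
          · rfl
          · rw [H0 e hm0] at hf; exact hf
        exact ⟨hi, hm, pvReach.step s0 (x, y) e hxyq.2.2 hnb hi hgt hm0f⟩
    have H0' : ∀ e : Int × Int, m0 e = true →
        pvVAt (pvNbFold grid t x y (vis.val, q', size)).1 e.1 e.2 = true :=
      fun e h => S2 _ _ (H0 e h)
    have Hs' : ∀ e : Int × Int, pvInR grid e →
        pvVAt (pvNbFold grid t x y (vis.val, q', size)).1 e.1 e.2 = true →
        m0 e = true ∨ pvReach grid t m0 s0 e := by
      intro e hi hv
      rcases S3 e hi hv with hold | hq
      · exact Hs e hi hold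
      · exact Or.inr (Hq' e hq).2.2
    have Hc' : ∀ e : Int × Int, pvInR grid e →
        pvVAt (pvNbFold grid t x y (vis.val, q', size)).1 e.1 e.2 = true →
        pvReach grid t m0 s0 e →
        e ∈ (pvNbFold grid t x y (vis.val, q', size)).2.1 ∨
        ∀ d ∈ pvBNbrs e.1 e.2, pvInR grid d → pvGAt grid d.1 d.2 = t →
          pvVAt (pvNbFold grid t x y (vis.val, q', size)).1 d.1 d.2 = true := by
      intro e hi hv hr
      rcases S3 e hi hv with hold | hnew
      · rcases Hc e hi hold hr with hq | hcl
        · rcases List.mem_cons.mp hq with heq | hq'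
          · subst heq
            right
            intro d hd hdin hdg
            rw [← pvDirs_map x y] at hd
            obtain ⟨dd, hdd, hdde⟩ := List.mem_map.mp hd
            cases hdde
            exact S4 dd hdd hdin hdg
          · exact Or.inl (S6 e hq')
        · exact Or.inr (fun d hd hdin hdg => S2 _ _ (hcl d hd hdin hdg))
      · exact Or.inl hnew
    obtain ⟨C1, C2, C3⟩ := ih H0' Hq' Hs' Hc'
    exact ⟨fun e h => C1 e (S2 _ _ h), C2, C3⟩

theorem pvBfs_char (grid : List (List Int)) (sx sy : Int) (vis : pvVis grid.length)
    (hs : pvInR grid (sx, sy)) :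
    ∀ e : Int × Int, pvInR grid e →
      (pvVAt (pvBfs grid sx sy vis).1.val e.1 e.2 = true ↔
        pvVAt (pvVSet vis.val sx sy) e.1 e.2 = true ∨
        pvReach grid (pvGAt grid sx sy)
          (fun d => pvVAt (pvVSet vis.val sx sy) d.1 d.2) (sx, sy) e) := by
  have hxb : sx.toNat < grid.length := by
    have h1 := hs.1; have h2 := hs.2.1; simp only [pvN] at h2; omega
  have hyb : sy.toNat < grid.length := by
    have h1 := hs.2.2.1; have h2 := hs.2.2.2; simp only [pvN] at h2; omega
  have hself : pvVAt (pvVSet vis.val sx sy) sx sy = true :=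
    pvVAt_vSet_self vis.property hxb hyb
  obtain ⟨C1, C2, C3⟩ := pvBfsLoop_char grid (pvGAt grid sx sy)
    (fun d => pvVAt (pvVSet vis.val sx sy) d.1 d.2) (sx, sy)
    ⟨pvVSet vis.val sx sy, pvVSet_shape vis.property sx sy⟩ [(sx, sy)] 1
    (fun e h => h)
    (by
      intro e he
      rcases List.mem_singleton.mp he with rfl
      exact ⟨hs, hself, pvReach.refl _⟩)
    (fun e hi hv => Or.inl hv)
    (by
      intro e hi hv hr
      rcases pvReach_val hr with rfl | ⟨hgt, hmf⟩
      · exact Or.inl (List.mem_singleton.mpr rfl)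
      · rw [hv] at hmf; cases hmf)
  have hmarked : ∀ e : Int × Int,
      pvReach grid (pvGAt grid sx sy) (fun d => pvVAt (pvVSet vis.val sx sy) d.1 d.2) (sx, sy) e →
      pvVAt (pvBfs grid sx sy vis).1.val e.1 e.2 = true := by
    intro e hre
    induction hre with
    | refl => exact C1 _ hself
    | step c d hr hnb hdin hdg hdm ihh =>
      exact C3 c (pvReach_inR hr hs) ihh hr d hnb hdin hdg
  intro e he
  constructor
  · exact C2 e he
  · intro h
    rcases h with h | h
    · exact C1 e h
    · exact hmarked e h

theorem pvBfs_size (grid : List (List Int)) (sx sy : Int) (vis : pvVis grid.length)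
    (hs : pvInR grid (sx, sy)) :
    2 ≤ (pvBfs grid sx sy vis).2 ↔
      ∃ d ∈ pvBNbrs sx sy, pvInR grid d ∧ pvGAt grid d.1 d.2 = pvGAt grid sx sy ∧
        pvVAt vis.val d.1 d.2 = false := by
  have hent : ∀ d ∈ pvBNbrs sx sy, pvInR grid d →
      pvVAt (pvVSet vis.val sx sy) d.1 d.2 = pvVAt vis.val d.1 d.2 := by
    intro d hd hdin
    exact pvVAt_vSet_ne (pvInR_toNat_ne hs hdin (Ne.symm (pvBNbrs_ne_center hd)))
  constructor
  · intro h2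
    by_contra hno
    push Not at hno
    have hid : pvNbFold grid (pvGAt grid sx sy) sx sy (pvVSet vis.val sx sy, [], 1) =
        (pvVSet vis.val sx sy, [], 1) := by
      apply pvAFold_id
      intro dd hdd hcontra
      obtain ⟨hb1, hb2, hb3, hb4, hbf, hbt⟩ := hcontra
      have hcin : pvInR grid (sx + dd.1, sy + dd.2) := ⟨hb1, hb2, hb3, hb4⟩
      have hcnb : (sx + dd.1, sy + dd.2) ∈ pvBNbrs sx sy := by
        rw [← pvDirs_map sx sy]
        exact List.mem_map.mpr ⟨dd, hdd, rfl⟩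
      rw [hent _ hcnb hcin] at hbf
      exact hno (sx + dd.1, sy + dd.2) hcnb hcin hbt hbf
    unfold pvBfs at h2
    rw [pvBfsLoop] at h2
    simp only [hid] at h2
    rw [pvBfsLoop] at h2
    omega
  · intro hex
    obtain ⟨d, hd, hdin, hdg, hdf⟩ := hex
    have hdd : ∃ dd ∈ pvDirs, d = (sx + dd.1, sy + dd.2) := by
      rw [← pvDirs_map sx sy] at hd
      obtain ⟨dd, hdd, hdde⟩ := List.mem_map.mp hd
      exact ⟨dd, hdd, hdde.symm⟩
    obtain ⟨dd, hddm, rfl⟩ := hdd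
    obtain ⟨S1, S2, S3, S4, S5, S6, S7, S8⟩ :=
      pvAFoldSpec grid (pvGAt grid sx sy) sx sy pvDirs (pvVSet vis.val sx sy) [] 1
        (pvVSet_shape vis.property sx sy)
    have hentf : pvVAt (pvVSet vis.val sx sy) (sx + dd.1) (sy + dd.2) = false := by
      rw [hent _ hd hdin]; exact hdf
    have hmk := S4 dd hddm hdin hdg
    have hsz := S8 _ hdin hentf hmk
    unfold pvBfs
    rw [pvBfsLoop]
    exact le_trans hsz (pvBfsLoop_sizeMono grid (pvGAt grid sx sy) _ _ _)


-- ===== the same characterization for B's DFS over a coordinate set =====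
theorem pvBFoldSpec (grid : List (List Int)) (t : Int) (L : List (Int × Int)) :
    ∀ (V : PySem.Set (Int × Int)) (q : List (Int × Int)) (size : Nat),
    (∀ e : Int × Int, PySem.Set.contains V e = true →
      PySem.Set.contains (L.foldl (pvBVisit grid t) (V, q, size)).1 e = true) ∧
    (∀ e : Int × Int, PySem.Set.contains (L.foldl (pvBVisit grid t) (V, q, size)).1 e = true →
      PySem.Set.contains V e = true ∨ e ∈ (L.foldl (pvBVisit grid t) (V, q, size)).2.1) ∧
    (∀ e ∈ L, pvInR grid e → pvGAt grid e.1 e.2 = t →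
      PySem.Set.contains (L.foldl (pvBVisit grid t) (V, q, size)).1 e = true) ∧
    (∀ e ∈ (L.foldl (pvBVisit grid t) (V, q, size)).2.1, e ∈ q ∨
      (e ∈ L ∧ pvInR grid e ∧ pvGAt grid e.1 e.2 = t ∧ PySem.Set.contains V e = false ∧
        PySem.Set.contains (L.foldl (pvBVisit grid t) (V, q, size)).1 e = true)) ∧
    (∀ e ∈ q, e ∈ (L.foldl (pvBVisit grid t) (V, q, size)).2.1) ∧
    (size ≤ (L.foldl (pvBVisit grid t) (V, q, size)).2.2) ∧
    (∀ e : Int × Int, PySem.Set.contains V e = false →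
      PySem.Set.contains (L.foldl (pvBVisit grid t) (V, q, size)).1 e = true →
      size + 1 ≤ (L.foldl (pvBVisit grid t) (V, q, size)).2.2) := by
  induction L with
  | nil =>
    intro V q size
    simp only [List.foldl_nil]
    refine ⟨fun e h => h, fun e h => Or.inl h, ?_, fun e he => Or.inl he, fun e he => he,
      le_refl _, fun e hf ht => absurd ht (by rw [hf]; exact Bool.false_ne_true)⟩
    intro e he
    cases he
  | cons c L ih =>
    intro V q size
    simp only [List.foldl_cons] at *
    by_cases hg : 0 ≤ c.1 ∧ c.1 < (grid.length : Int) ∧ 0 ≤ c.2 ∧ c.2 < (grid.length : Int) ∧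
        PySem.Set.contains V c = false ∧ pvBAt grid c = t
    · rw [show pvBVisit grid t (V, q, size) c = (PySem.Set.add V c, q ++ [c], size + 1) from by
        simp only [pvBVisit, if_pos hg]]
      obtain ⟨S1, S2, S3, S4, S5, S6, S7⟩ := ih (PySem.Set.add V c) (q ++ [c]) (size + 1)
      have hcin : pvInR grid c := ⟨hg.1, hg.2.1, hg.2.2.1, hg.2.2.2.1⟩
      have hmark : PySem.Set.contains (PySem.Set.add V c) c = true := by
        rw [pvContains_add]; simp
      have hmono : ∀ e : Int × Int, PySem.Set.contains V e = true →
          PySem.Set.contains (PySem.Set.add V c) e = true := by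
        intro e h
        rw [pvContains_add, h]
        rfl
      refine ⟨fun e h => S1 e (hmono e h), ?_, ?_, ?_, ?_, ?_, fun e _ _ => S6⟩
      · intro e hre
        rcases S2 e hre with h1 | h1
        · rw [pvContains_add] at h1
          rcases Bool.or_eq_true_iff.mp h1 with h2 | h2
          · exact Or.inl h2
          · have : e = c := of_decide_eq_true h2
            subst this
            exact Or.inr (S5 _ (List.mem_append.mpr (Or.inr (List.mem_singleton.mpr rfl))))
        · exact Or.inr h1
      · intro e he hin hgt
        rcases List.mem_cons.mp he with rfl | he'
        · exact S1 _ hmark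
        · exact S3 e he' hin hgt
      · intro e he
        rcases S4 e he with h1 | h1
        · rcases List.mem_append.mp h1 with h2 | h2
          · exact Or.inl h2
          · right
            have he2 : e = c := List.mem_singleton.mp h2
            subst he2
            exact ⟨List.mem_cons_self, hcin, hg.2.2.2.2.2, hg.2.2.2.2.1, S1 _ hmark⟩
        · obtain ⟨hL, hi, hgt, hf, hm⟩ := h1
          refine Or.inr ⟨List.mem_cons_of_mem _ hL, hi, hgt, ?_, hm⟩
          cases hVe : PySem.Set.contains V e
          · rfl
          · rw [hmono e hVe] at hf
            exact hf
      · exact fun e he => S5 e (List.mem_append.mpr (Or.inl he))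
      · exact le_trans (Nat.le_succ _) S6
    · rw [show pvBVisit grid t (V, q, size) c = (V, q, size) from by
        simp only [pvBVisit, if_neg hg]]
      obtain ⟨S1, S2, S3, S4, S5, S6, S7⟩ := ih V q size
      refine ⟨S1, S2, ?_, ?_, S5, S6, S7⟩
      · intro e he hin hgt
        rcases List.mem_cons.mp he with rfl | he'
        · have hVt : PySem.Set.contains V e = true := by
            by_contra hf
            rw [Bool.not_eq_true] at hf
            exact hg ⟨hin.1, hin.2.1, hin.2.2.1, hin.2.2.2, hf, hgt⟩
          exact S1 _ hVt
        · exact S3 e he' hin hgt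
      · intro e he
        rcases S4 e he with h1 | h1
        · exact Or.inl h1
        · obtain ⟨hL, hi, hgt, hf, hm⟩ := h1
          exact Or.inr ⟨List.mem_cons_of_mem _ hL, hi, hgt, hf, hm⟩

theorem pvBFold_id (grid : List (List Int)) (t : Int) (L : List (Int × Int))
    (V : PySem.Set (Int × Int)) (q : List (Int × Int)) (size : Nat)
    (h : ∀ c ∈ L, ¬(0 ≤ c.1 ∧ c.1 < (grid.length : Int) ∧ 0 ≤ c.2 ∧ c.2 < (grid.length : Int) ∧
      PySem.Set.contains V c = false ∧ pvBAt grid c = t)) :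
    L.foldl (pvBVisit grid t) (V, q, size) = (V, q, size) := by
  induction L with
  | nil => rfl
  | cons c L ih =>
    simp only [List.foldl_cons] at *
    rw [show pvBVisit grid t (V, q, size) c = (V, q, size) from by
      simp only [pvBVisit, if_neg (h c List.mem_cons_self)]]
    exact ih (fun c' hc' => h c' (List.mem_cons_of_mem _ hc'))

theorem pvBLoop_sizeMono (grid : List (List Int)) (t : Int) :
    ∀ (vis : PySem.Set (Int × Int)) (stack : List (Int × Int)) (size : Nat),
    size ≤ (pvBLoop grid t vis stack size).2 := by
  intro vis stack size
  induction vis, stack, size using pvBLoop.induct grid t with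
  | case1 vis size => rw [pvBLoop]; simp
  | case2 vis stack size h c st ih =>
    rw [pvBLoop]
    simp only [dif_neg h]
    exact le_trans
      (pvBFoldSpec grid t (pvBNbrs (stack.getLast h).1 (stack.getLast h).2) vis
        stack.dropLast size).2.2.2.2.2.1 ih

theorem pvBLoop_char (grid : List (List Int)) (t : Int) (m0 : Int × Int → Bool)
    (s0 : Int × Int) :
    ∀ (vis : PySem.Set (Int × Int)) (stack : List (Int × Int)) (size : Nat),
    (∀ e : Int × Int, m0 e = true → PySem.Set.contains vis e = true) →
    (∀ e ∈ stack, pvInR grid e ∧ PySem.Set.contains vis e = true ∧ pvReach grid t m0 s0 e) →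
    (∀ e : Int × Int, PySem.Set.contains vis e = true →
      m0 e = true ∨ pvReach grid t m0 s0 e) →
    (∀ e : Int × Int, PySem.Set.contains vis e = true → pvReach grid t m0 s0 e →
      e ∈ stack ∨ ∀ d ∈ pvBNbrs e.1 e.2, pvInR grid d → pvGAt grid d.1 d.2 = t →
        PySem.Set.contains vis d = true) →
    (∀ e : Int × Int, PySem.Set.contains vis e = true →
      PySem.Set.contains (pvBLoop grid t vis stack size).1 e = true) ∧
    (∀ e : Int × Int, PySem.Set.contains (pvBLoop grid t vis stack size).1 e = true →
      m0 e = true ∨ pvReach grid t m0 s0 e) ∧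
    (∀ e : Int × Int, PySem.Set.contains (pvBLoop grid t vis stack size).1 e = true →
      pvReach grid t m0 s0 e →
      ∀ d ∈ pvBNbrs e.1 e.2, pvInR grid d → pvGAt grid d.1 d.2 = t →
        PySem.Set.contains (pvBLoop grid t vis stack size).1 d = true) := by
  intro vis stack size
  induction vis, stack, size using pvBLoop.induct grid t with
  | case1 vis size =>
    intro H0 Hq Hs Hc
    rw [pvBLoop]
    refine ⟨fun e h => h, Hs, ?_⟩
    intro e hm hr d hd hdin hdg
    rcases Hc e hm hr with h | h
    · cases h
    · exact h d hd hdin hdg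
  | case2 vis stack size h c st ih =>
    intro H0 Hq Hs Hc
    rw [pvBLoop]
    simp only [dif_neg h]
    obtain ⟨S1, S2, S3, S4, S5, S6, S7⟩ :=
      pvBFoldSpec grid t (pvBNbrs (stack.getLast h).1 (stack.getLast h).2) vis
        stack.dropLast size
    have hlast := Hq (stack.getLast h) (List.getLast_mem h)
    have hdrop : ∀ e ∈ stack.dropLast, e ∈ stack := fun e he => List.mem_of_mem_dropLast he
    have Hq' : ∀ e ∈ (List.foldl (pvBVisit grid t) (vis, stack.dropLast, size)
          (pvBNbrs (stack.getLast h).1 (stack.getLast h).2)).2.1,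
        pvInR grid e ∧ PySem.Set.contains (List.foldl (pvBVisit grid t)
          (vis, stack.dropLast, size)
          (pvBNbrs (stack.getLast h).1 (stack.getLast h).2)).1 e = true ∧
        pvReach grid t m0 s0 e := by
      intro e he
      rcases S4 e he with h1 | h1
      · obtain ⟨hi, hv, hr⟩ := Hq e (hdrop e h1)
        exact ⟨hi, S1 _ hv, hr⟩
      · obtain ⟨hL, hi, hgt, hf, hm⟩ := h1
        have hm0f : m0 e = false := by
          cases hm0 : m0 e
          · rfl
          · rw [H0 e hm0] at hf; exact hf
        exact ⟨hi, hm, pvReach.step s0 (stack.getLast h) e hlast.2.2 hL hi hgt hm0f⟩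
    have H0' : ∀ e : Int × Int, m0 e = true →
        PySem.Set.contains (List.foldl (pvBVisit grid t) (vis, stack.dropLast, size)
          (pvBNbrs (stack.getLast h).1 (stack.getLast h).2)).1 e = true :=
      fun e hh => S1 _ (H0 e hh)
    have Hs' : ∀ e : Int × Int,
        PySem.Set.contains (List.foldl (pvBVisit grid t) (vis, stack.dropLast, size)
          (pvBNbrs (stack.getLast h).1 (stack.getLast h).2)).1 e = true →
        m0 e = true ∨ pvReach grid t m0 s0 e := by
      intro e hv
      rcases S2 e hv with hold | hq
      · exact Hs e hold
      · exact Or.inr (Hq' e hq).2.2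
    have Hc' : ∀ e : Int × Int,
        PySem.Set.contains (List.foldl (pvBVisit grid t) (vis, stack.dropLast, size)
          (pvBNbrs (stack.getLast h).1 (stack.getLast h).2)).1 e = true →
        pvReach grid t m0 s0 e →
        e ∈ (List.foldl (pvBVisit grid t) (vis, stack.dropLast, size)
          (pvBNbrs (stack.getLast h).1 (stack.getLast h).2)).2.1 ∨
        ∀ d ∈ pvBNbrs e.1 e.2, pvInR grid d → pvGAt grid d.1 d.2 = t →
          PySem.Set.contains (List.foldl (pvBVisit grid t) (vis, stack.dropLast, size)
            (pvBNbrs (stack.getLast h).1 (stack.getLast h).2)).1 d = true := by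
      intro e hv hr
      rcases S2 e hv with hold | hnew
      · rcases Hc e hold hr with hq | hcl
        · rw [← List.dropLast_append_getLast h] at hq
          rcases List.mem_append.mp hq with hq1 | hq1
          · exact Or.inl (S5 e hq1)
          · have heq : e = stack.getLast h := List.mem_singleton.mp hq1
            subst heq
            exact Or.inr (fun d hd hdin hdg => S3 d hd hdin hdg)
        · exact Or.inr (fun d hd hdin hdg => S1 _ (hcl d hd hdin hdg))
      · exact Or.inl hnew
    obtain ⟨C1, C2, C3⟩ := ih H0' Hq' Hs' Hc'
    exact ⟨fun e hh => C1 e (S1 _ hh), C2, C3⟩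

theorem pvBoolEq {a b : Bool} (h : a = true ↔ b = true) : a = b := by
  cases a <;> cases b <;> simp_all

theorem pvBDfs_char (grid : List (List Int)) (t : Int) (s2 : PySem.Set (Int × Int))
    (c : Int × Int) (hc : pvInR grid c) :
    ∀ e : Int × Int,
      (PySem.Set.contains (pvBLoop grid t (PySem.Set.add s2 c) [c] 1).1 e = true ↔
        PySem.Set.contains (PySem.Set.add s2 c) e = true ∨
        pvReach grid t (fun d => PySem.Set.contains (PySem.Set.add s2 c) d) c e) := by
  have hself : PySem.Set.contains (PySem.Set.add s2 c) c = true := by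
    rw [pvContains_add]; simp
  obtain ⟨C1, C2, C3⟩ := pvBLoop_char grid t
    (fun d => PySem.Set.contains (PySem.Set.add s2 c) d) c (PySem.Set.add s2 c) [c] 1
    (fun e h => h)
    (by
      intro e he
      rcases List.mem_singleton.mp he with rfl
      exact ⟨hc, hself, pvReach.refl _⟩)
    (fun e hv => Or.inl hv)
    (by
      intro e hv hr
      rcases pvReach_val hr with rfl | ⟨hgt, hmf⟩
      · exact Or.inl (List.mem_singleton.mpr rfl)
      · rw [hv] at hmf; cases hmf)
  have hmarked : ∀ e : Int × Int,
      pvReach grid t (fun d => PySem.Set.contains (PySem.Set.add s2 c) d) c e →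
      PySem.Set.contains (pvBLoop grid t (PySem.Set.add s2 c) [c] 1).1 e = true := by
    intro e hre
    induction hre with
    | refl => exact C1 _ hself
    | step cc d hr hnb hdin hdg hdm ihh =>
      exact C3 cc ihh hr d hnb hdin hdg
  intro e
  constructor
  · exact C2 e
  · intro hh
    rcases hh with hh | hh
    · exact C1 e hh
    · exact hmarked e hh

theorem pvBDfs_size (grid : List (List Int)) (t : Int) (s2 : PySem.Set (Int × Int))
    (c : Int × Int) :
    2 ≤ (pvBLoop grid t (PySem.Set.add s2 c) [c] 1).2 ↔
      ∃ d ∈ pvBNbrs c.1 c.2, pvInR grid d ∧ pvGAt grid d.1 d.2 = t ∧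
        PySem.Set.contains s2 d = false := by
  have hent : ∀ d ∈ pvBNbrs c.1 c.2,
      PySem.Set.contains (PySem.Set.add s2 c) d = PySem.Set.contains s2 d := by
    intro d hd
    rw [pvContains_add]
    simp [pvBNbrs_ne_center hd]
  constructor
  · intro h2
    by_contra hno
    push Not at hno
    have hid : (pvBNbrs c.1 c.2).foldl (pvBVisit grid t)
        (PySem.Set.add s2 c, ([] : List (Int × Int)), 1) = (PySem.Set.add s2 c, [], 1) := by
      apply pvBFold_id
      intro d hd hcontra
      obtain ⟨hb1, hb2, hb3, hb4, hbf, hbt⟩ := hcontra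
      rw [hent d hd] at hbf
      exact hno d hd ⟨hb1, hb2, hb3, hb4⟩ hbt hbf
    rw [pvBLoop] at h2
    simp only [dif_neg (List.cons_ne_nil c []), List.getLast_singleton,
      List.dropLast_singleton] at h2
    simp only [hid] at h2
    rw [pvBLoop] at h2
    simp at h2
  · intro hex
    obtain ⟨d, hd, hdin, hdg, hdf⟩ := hex
    obtain ⟨S1, S2, S3, S4, S5, S6, S7⟩ :=
      pvBFoldSpec grid t (pvBNbrs c.1 c.2) (PySem.Set.add s2 c) [] 1
    have hentf : PySem.Set.contains (PySem.Set.add s2 c) d = false := by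
      rw [hent d hd]; exact hdf
    have hmk := S3 d hd hdin hdg
    have hsz := S7 d hentf hmk
    rw [pvBLoop]
    simp only [dif_neg (List.cons_ne_nil c []), List.getLast_singleton,
      List.dropLast_singleton]
    exact le_trans hsz (pvBLoop_sizeMono grid t _ _ _)

-- B's DFS with a target value t leaves membership of cells of any other value unchanged
theorem pvBDfs_frame (grid : List (List Int)) (t : Int) (s2 : PySem.Set (Int × Int))
    (c : Int × Int) (hc : pvInR grid c) (hgc : pvGAt grid c.1 c.2 = t) :
    ∀ e : Int × Int, pvGAt grid e.1 e.2 ≠ t →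
      PySem.Set.contains (pvBLoop grid t (PySem.Set.add s2 c) [c] 1).1 e =
        PySem.Set.contains s2 e := by
  intro e hne
  have hec : e ≠ c := fun hh => hne (hh ▸ hgc)
  have hentry : PySem.Set.contains (PySem.Set.add s2 c) e = PySem.Set.contains s2 e := by
    rw [pvContains_add]
    simp [hec]
  apply pvBoolEq
  rw [pvBDfs_char grid t s2 c hc e]
  constructor
  · intro hh
    rcases hh with hh | hh
    · rw [hentry] at hh; exact hh
    · rcases pvReach_val hh with rfl | ⟨hgt, _⟩
      · exact absurd hgc hne
      · exact absurd hgt hne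
  · intro hh
    exact Or.inl (by rw [hentry]; exact hh)

-- A's BFS started on a val-cell leaves non-val in-range cells unchanged
theorem pvBfs_frame (grid : List (List Int)) (sx sy : Int) (vis : pvVis grid.length)
    (hs : pvInR grid (sx, sy)) :
    ∀ e : Int × Int, pvInR grid e → pvGAt grid e.1 e.2 ≠ pvGAt grid sx sy →
      pvVAt (pvBfs grid sx sy vis).1.val e.1 e.2 = pvVAt vis.val e.1 e.2 := by
  intro e he hne
  have hec : (sx, sy) ≠ e := by
    intro hh
    exact hne (by rw [← hh])
  have hentry : pvVAt (pvVSet vis.val sx sy) e.1 e.2 = pvVAt vis.val e.1 e.2 :=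
    pvVAt_vSet_ne (pvInR_toNat_ne hs he hec)
  apply pvBoolEq
  rw [pvBfs_char grid sx sy vis hs e he]
  constructor
  · intro hh
    rcases hh with hh | hh
    · rw [hentry] at hh; exact hh
    · rcases pvReach_val hh with rfl | ⟨hgt, _⟩
      · exact absurd rfl hne
      · exact absurd hgt hne
  · intro hh
    exact Or.inl (by rw [hentry]; exact hh)

-- agreement of A's visited matrix and B's visited set on the cells of one value
def pvAgr (grid : List (List Int)) (t : Int) (v : List (List Bool))
    (s : PySem.Set (Int × Int)) : Prop :=
  ∀ c : Int × Int, pvInR grid c → pvGAt grid c.1 c.2 = t →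
    pvVAt v c.1 c.2 = PySem.Set.contains s c

-- after both explorations start at the same val-cell, agreement on val-cells is preserved
-- and the two sizes pass the >= 2 test together
theorem pvExplore_rel (grid : List (List Int)) {t : Int} {c : Int × Int}
    (hc : pvInR grid c) (hgc : pvGAt grid c.1 c.2 = t)
    (v1 : pvVis grid.length) (s2 : PySem.Set (Int × Int)) (hag : pvAgr grid t v1.val s2) :
    (2 ≤ (pvBfs grid c.1 c.2 v1).2 ↔ 2 ≤ (pvBLoop grid t (PySem.Set.add s2 c) [c] 1).2) ∧
    pvAgr grid t (pvBfs grid c.1 c.2 v1).1.val (pvBLoop grid t (PySem.Set.add s2 c) [c] 1).1 := by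
  have hc' : pvInR grid (c.1, c.2) := hc
  have hentAB : ∀ d : Int × Int, pvInR grid d → pvGAt grid d.1 d.2 = t →
      pvVAt (pvVSet v1.val c.1 c.2) d.1 d.2 = PySem.Set.contains (PySem.Set.add s2 c) d := by
    intro d hdin hdg
    by_cases hdc : d = c
    · subst hdc
      have hxb : d.1.toNat < grid.length := by
        have h1 := hdin.1; have h2 := hdin.2.1; simp only [pvN] at h2; omega
      have hyb : d.2.toNat < grid.length := by
        have h1 := hdin.2.2.1; have h2 := hdin.2.2.2; simp only [pvN] at h2; omega
      rw [pvVAt_vSet_self v1.property hxb hyb, pvContains_add]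
      simp
    · rw [pvVAt_vSet_ne (pvInR_toNat_ne hc' hdin (by simpa using (Ne.symm hdc))),
        pvContains_add, hag d hdin hdg]
      simp [hdc]
  have hgc' : pvGAt grid c.1 c.2 = t := hgc
  constructor
  · rw [pvBfs_size grid c.1 c.2 v1 hc', pvBDfs_size grid t s2 c]
    constructor
    · rintro ⟨d, hd, hdin, hdg, hdf⟩
      refine ⟨d, hd, hdin, by rw [hdg, hgc], ?_⟩
      rw [← hag d hdin (by rw [hdg, hgc])]
      exact hdf
    · rintro ⟨d, hd, hdin, hdg, hdf⟩
      refine ⟨d, hd, hdin, by rw [hdg, hgc], ?_⟩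
      rw [hag d hdin hdg]
      exact hdf
  · intro e he hge
    apply pvBoolEq
    rw [pvBfs_char grid c.1 c.2 v1 hc' e he, pvBDfs_char grid t s2 c hc e]
    have hreach : pvReach grid (pvGAt grid c.1 c.2)
          (fun d => pvVAt (pvVSet v1.val c.1 c.2) d.1 d.2) (c.1, c.2) e ↔
        pvReach grid t (fun d => PySem.Set.contains (PySem.Set.add s2 c) d) c e := by
      rw [hgc]
      have hcpair : (c.1, c.2) = c := rfl
      rw [hcpair]
      constructor
      · exact pvReach_congr (fun d hdin hdg => by rw [hentAB d hdin hdg])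
      · exact pvReach_congr (fun d hdin hdg => by rw [hentAB d hdin hdg])
    rw [hentAB e he hge, hreach]

-- ===== scan-level lemmas =====
-- the accumulator of each scan is append-only, and the visited result ignores it
theorem pvSplitA {grid : List (List Int)} {val : Int} (L : List (Int × Int)) :
    ∀ (v : pvVis grid.length) (pts : List (Int × Int)),
    L.foldl (pvCellA grid val) (v, pts) =
      ((L.foldl (pvCellA grid val) (v, [])).1, pts ++ (L.foldl (pvCellA grid val) (v, [])).2) := by
  induction L with
  | nil => intro v pts; simp
  | cons c L ih =>
    intro v pts
    simp only [List.foldl_cons]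
    have hstep : ∀ (acc : List (Int × Int)), pvCellA grid val (v, acc) c =
        ((pvCellA grid val (v, []) c).1, acc ++ (pvCellA grid val (v, []) c).2) := by
      intro acc
      unfold pvCellA
      split_ifs with h <;> simp
      split_ifs <;> simp
    rw [hstep pts]
    conv_rhs => rw [hstep []]
    rw [ih _ (pts ++ (pvCellA grid val (v, []) c).2), ih _ ([] ++ (pvCellA grid val (v, []) c).2)]
    simp

theorem pvSplitB {grid : List (List Int)} (L : List (Int × Int)) :
    ∀ (s : PySem.Set (Int × Int)) (recs : List (Int × (Int × Int))),
    L.foldl (pvBCell grid) (s, recs) =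
      ((L.foldl (pvBCell grid) (s, [])).1, recs ++ (L.foldl (pvBCell grid) (s, [])).2) := by
  induction L with
  | nil => intro s recs; simp
  | cons c L ih =>
    intro s recs
    simp only [List.foldl_cons]
    have hstep : ∀ (acc : List (Int × (Int × Int))), pvBCell grid (s, acc) c =
        ((pvBCell grid (s, []) c).1, acc ++ (pvBCell grid (s, []) c).2) := by
      intro acc
      simp only [pvBCell]
      split_ifs with h <;> simp
    rw [hstep recs]
    conv_rhs => rw [hstep []]
    rw [ih _ (recs ++ (pvBCell grid (s, []) c).2), ih _ ([] ++ (pvBCell grid (s, []) c).2)]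
    simp

-- A's pass for value `val` only marks cells whose grid value is `val`
theorem pvPassA_frame (grid : List (List Int)) {val : Int} (L : List (Int × Int))
    (hL : ∀ c ∈ L, pvInR grid c) :
    ∀ (v : pvVis grid.length) (pts : List (Int × Int)) {c : Int × Int},
    pvInR grid c → pvGAt grid c.1 c.2 ≠ val →
    pvVAt (L.foldl (pvCellA grid val) (v, pts)).1.val c.1 c.2 = pvVAt v.val c.1 c.2 := by
  induction L with
  | nil => intro v pts c hc hg; rfl
  | cons a L ih =>
    intro v pts c hc hg
    simp only [List.foldl_cons]
    rw [ih (fun c hcL => hL c (List.mem_cons_of_mem _ hcL)) _ _ hc hg]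
    by_cases h : pvGAt grid a.1 a.2 = val ∧ pvVAt v.val a.1 a.2 = false
    · simp only [pvCellA, if_pos h]
      exact pvBfs_frame grid a.1 a.2 v (hL a List.mem_cons_self) c hc (by rw [h.1]; exact hg)
    · simp only [pvCellA, if_neg h]

-- THE central lemma: A's pass for `val` from any visited matrix that agrees with B's set on
-- the `val`-cells produces exactly the `val`-records of B's single pass, preserving agreement
theorem pvScanRel (grid : List (List Int)) {val : Int} (L : List (Int × Int))
    (hL : ∀ c ∈ L, pvInR grid c) (hval : 1 ≤ val ∧ val ≤ 5) :
    ∀ (v1 : pvVis grid.length) (s2 : PySem.Set (Int × Int)), pvAgr grid val v1.val s2 →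
    (L.foldl (pvCellA grid val) (v1, [])).2 =
      ((L.foldl (pvBCell grid) (s2, [])).2).filterMap
        (fun r => if r.1 = val then some r.2 else none) ∧
    pvAgr grid val (L.foldl (pvCellA grid val) (v1, [])).1.val
      (L.foldl (pvBCell grid) (s2, [])).1 := by
  induction L with
  | nil => intro v1 s2 h; exact ⟨rfl, h⟩
  | cons c L ih =>
    intro v1 s2 h
    have hc := hL c List.mem_cons_self
    have hL' : ∀ d ∈ L, pvInR grid d := fun d hd => hL d (List.mem_cons_of_mem _ hd)
    simp only [List.foldl_cons]
    by_cases hg : pvGAt grid c.1 c.2 = val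
    · have hvv : pvVAt v1.val c.1 c.2 = PySem.Set.contains s2 c := h c hc hg
      have hBt : pvBAt grid c = val := hg
      by_cases hvis : pvVAt v1.val c.1 c.2 = false
      · -- both explore from c
        have hA : pvCellA grid val (v1, ([] : List (Int × Int))) c =
            ((pvBfs grid c.1 c.2 v1).1,
              if 2 ≤ (pvBfs grid c.1 c.2 v1).2 then [c] else []) := by
          simp only [pvCellA, if_pos (show pvGAt grid c.1 c.2 = val ∧
            pvVAt (v1, ([] : List (Int × Int))).1.val c.1 c.2 = false from ⟨hg, hvis⟩),
            List.nil_append]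
        have hB : pvBCell grid (s2, ([] : List (Int × (Int × Int)))) c =
            ((pvBLoop grid val (PySem.Set.add s2 c) [c] 1).1,
              if 2 ≤ (pvBLoop grid val (PySem.Set.add s2 c) [c] 1).2
              then [(val, c)] else []) := by
          simp only [pvBCell, hBt, if_pos (show 1 ≤ val ∧ val ≤ 5 ∧
            PySem.Set.contains (s2, ([] : List (Int × (Int × Int)))).1 c = false from
            ⟨hval.1, hval.2, by rw [← hvv]; exact hvis⟩), List.nil_append]
        obtain ⟨hsz, hagr⟩ := pvExplore_rel grid hc hg v1 s2 h
        rw [hA, hB, pvSplitA L, pvSplitB L]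
        obtain ⟨hrest, hfin⟩ := ih hL' (pvBfs grid c.1 c.2 v1).1
          (pvBLoop grid val (PySem.Set.add s2 c) [c] 1).1 hagr
        refine ⟨?_, hfin⟩
        rw [List.filterMap_append, hrest]
        by_cases h2 : 2 ≤ (pvBfs grid c.1 c.2 v1).2
        · rw [if_pos h2, if_pos (hsz.mp h2)]
          simp
        · rw [if_neg h2, if_neg (fun hh => h2 (hsz.mpr hh))]
          simp
      · -- c is already visited in both scans
        have hct : PySem.Set.contains s2 c = true := by
          rw [← hvv]
          cases hx : pvVAt v1.val c.1 c.2
          · exact absurd hx hvis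
          · rfl
        have hA : pvCellA grid val (v1, ([] : List (Int × Int))) c = (v1, []) := by
          simp only [pvCellA, if_neg (show ¬(pvGAt grid c.1 c.2 = val ∧
            pvVAt (v1, ([] : List (Int × Int))).1.val c.1 c.2 = false) from fun hh => hvis hh.2)]
        have hB : pvBCell grid (s2, ([] : List (Int × (Int × Int)))) c = (s2, []) := by
          simp only [pvBCell, if_neg (show ¬(1 ≤ pvBAt grid c ∧ pvBAt grid c ≤ 5 ∧
            PySem.Set.contains (s2, ([] : List (Int × (Int × Int)))).1 c = false) from
            fun hh => by rw [hct] at hh; exact absurd hh.2.2 (by simp))]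
        rw [hA, hB]
        exact ih hL' v1 s2 h
    · -- c has a different value: A skips it
      have hA : pvCellA grid val (v1, ([] : List (Int × Int))) c = (v1, []) := by
        simp only [pvCellA, if_neg (show ¬(pvGAt grid c.1 c.2 = val ∧
          pvVAt (v1, ([] : List (Int × Int))).1.val c.1 c.2 = false) from fun hh => hg hh.1)]
      rw [hA]
      by_cases hgB : 1 ≤ pvBAt grid c ∧ pvBAt grid c ≤ 5 ∧ PySem.Set.contains s2 c = false
      · -- B explores a component of another value: it leaves the val-cells alone
        have hB : pvBCell grid (s2, ([] : List (Int × (Int × Int)))) c =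
            ((pvBLoop grid (pvBAt grid c) (PySem.Set.add s2 c) [c] 1).1,
              if 2 ≤ (pvBLoop grid (pvBAt grid c) (PySem.Set.add s2 c) [c] 1).2
              then [(pvBAt grid c, c)] else []) := by
          simp only [pvBCell, if_pos (show 1 ≤ pvBAt grid c ∧ pvBAt grid c ≤ 5 ∧
            PySem.Set.contains (s2, ([] : List (Int × (Int × Int)))).1 c = false from hgB),
            List.nil_append]
        rw [hB, pvSplitB L]
        have hagr' : pvAgr grid val v1.val (pvBLoop grid (pvBAt grid c)
            (PySem.Set.add s2 c) [c] 1).1 := by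
          intro d hdin hdg
          rw [pvBDfs_frame grid (pvBAt grid c) s2 c hc rfl d
            (by rw [hdg]; exact fun hh => hg hh.symm)]
          exact h d hdin hdg
        obtain ⟨hrest, hfin⟩ := ih hL' v1 _ hagr'
        refine ⟨?_, hfin⟩
        rw [List.filterMap_append, hrest]
        have hne : ¬(pvBAt grid c = val) := hg
        split_ifs with h2
        · simp [hne]
        · simp
      · -- B skips c as well
        have hB : pvBCell grid (s2, ([] : List (Int × (Int × Int)))) c = (s2, []) := by
          simp only [pvBCell, if_neg hgB]
        rw [hB]
        exact ih hL' v1 s2 h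

-- ===== assembly: nested loops as one cell list, and the chain of A's five passes =====
theorem pvNestedFlat {σ : Type} (f : σ → Int × Int → σ) (is js : List Int) (s : σ) :
    is.foldl (fun st i => js.foldl (fun st j => f st (i, j)) st) s
      = (is.flatMap (fun i => js.map (fun j => (i, j)))).foldl f s := by
  induction is generalizing s with
  | nil => rfl
  | cons i is ih =>
    simp only [List.foldl_cons, List.flatMap_cons, List.foldl_append, List.foldl_map]
    exact ih _

theorem pvBCells_inR (grid : List (List Int)) : ∀ c ∈ pvBCells grid, pvInR grid c := by
  intro c hc
  simp only [pvBCells, List.mem_flatMap, List.mem_map] at hc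
  obtain ⟨i, hi, j, hj, rfl⟩ := hc
  rw [PySem.List.mem_pyRange_one] at hi hj
  exact ⟨hi.1, hi.2, hj.1, hj.2⟩

theorem pvVAt_replicate (m : Nat) (a b : Int) :
    pvVAt (List.replicate m (List.replicate m false)) a b = false := by
  unfold pvVAt
  simp only [List.getD_eq_getElem?_getD, List.getElem?_replicate]
  split_ifs
  · simp only [Option.getD_some, List.getElem?_replicate]
    split_ifs <;> rfl
  · rfl

theorem pvMain (grid : List (List Int)) (vals : List Int) :
    ∀ (v : pvVis grid.length) (pts : List (Int × Int)),
    (∀ t ∈ vals, 1 ≤ t ∧ t ≤ 5) → vals.Nodup →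
    (∀ t ∈ vals, pvAgr grid t v.val PySem.Set.empty) →
    (vals.foldl (fun st val => (pvBCells grid).foldl (pvCellA grid val) st) (v, pts)).2
      = pts ++ vals.flatMap (fun w =>
          ((((pvBCells grid).foldl (pvBCell grid) (PySem.Set.empty, [])).2).filterMap
            (fun r => if r.1 = w then some r.2 else none))) := by
  induction vals with
  | nil => intro v pts _ _ _; simp
  | cons val vals ih =>
    intro v pts hb hnd hagr
    simp only [List.foldl_cons, List.flatMap_cons]
    rw [pvSplitA (pvBCells grid) v pts]
    obtain ⟨hpts, _⟩ := pvScanRel grid (pvBCells grid) (pvBCells_inR grid)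
      (hb val List.mem_cons_self) v PySem.Set.empty (hagr val List.mem_cons_self)
    rw [ih _ _ (fun t ht => hb t (List.mem_cons_of_mem _ ht)) (List.Nodup.of_cons hnd) ?later]
    · rw [hpts]
      simp
    case later =>
      intro t ht d hd hgd
      have htv : t ≠ val := by
        intro hEq
        exact (List.nodup_cons.mp hnd).1 (hEq ▸ ht)
      rw [pvPassA_frame grid (pvBCells grid) (pvBCells_inR grid) v [] hd
        (by rw [hgd]; exact htv)]
      exact hagr t (List.mem_cons_of_mem _ ht) d hd hgd

-- ===== VERDICT (by name: the statement is the Claim_ definition above) =====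
theorem find_valid_blocks_spec : Claim_equal_find_valid_blocks := by
  intro grid _ _
  unfold Spec_find_valid_blocks find_valid_blocks find_valid_blocks_alt
  simp only []
  simp only [pvNestedFlat]
  rw [show PySem.List.pyRange 1 (5 + 1) 1 = [1, 2, 3, 4, 5] from by decide]
  rw [PySem.List.foldl_append_eq_flatMap]
  have hc : (List.flatMap (fun i => List.map (fun j => (i, j))
      (PySem.List.pyRange 0 (pvN grid) 1)) (PySem.List.pyRange 0 (pvN grid) 1)) =
      pvBCells grid := rfl
  simp only [hc]
  rw [pvMain grid [1, 2, 3, 4, 5] _ [] (by decide) (by decide) ?agr]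
  · simp only [show (List.flatMap (fun i => List.map (fun j => (i, j))
        (PySem.List.pyRange 0 (grid.length : Int) 1))
        (PySem.List.pyRange 0 (grid.length : Int) 1)) = pvBCells grid from rfl]
  case agr =>
    intro t _ d _ _
    rw [pvVAt_replicate]
    rfl
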